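-- pv_equiv track=rewrite | github.com/saccofrancesco/crosswords | main.py | clean_and_split_clues
-- ===== SOURCE A (Python) =====
-- def clean_and_split_clues(text: str) -> list:
--     """
--     Cleans and splits the text into individual clues.
--
--     Parameters:
--     text (str): The raw text containing the clues.
--
--     Returns:
--     list: A list of cleaned clues.
--     """
--     # Clean the data
--     text: str = text.replace(
--         "ORIZZONTALI", "").replace(
--         "VERTICALI", "").replace(
--         ":", "").replace(
--         "-", "").replace(
--         "_", "").replace(
--         ".", "")
--     not_filtered_list: list = text.split()
--
--     # Split the clues
--     cleared_clues: list = []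
--     current_clue: str = ""
--     for word in not_filtered_list:
--         if word.isdigit() and len(word) not in [3, 4]:
--             if current_clue:
--                 cleared_clues.append(current_clue.strip())
--                 current_clue: str = ""
--         else:
--             current_clue += f"{word} "
--     if current_clue:
--         cleared_clues.append(current_clue.strip())
--
--     return cleared_clues
-- ===== SOURCE B (Python) =====
-- def clean_and_split_clues(text: str) -> list:
--     for tok in ("ORIZZONTALI", "VERTICALI", ":", "-", "_", "."):
--         text = text.replace(tok, "")
--     words = text.split()
--
--     def boundary(w):
--         return w.isdigit() and len(w) not in (3, 4)
--
--     runs = []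
--     i, n = 0, len(words)
--     while i < n:
--         if boundary(words[i]):
--             i += 1
--             continue
--         j = i
--         while j < n and not boundary(words[j]):
--             j += 1
--         runs.append(words[i:j])
--         i = j
--     return [" ".join(r) for r in runs]
-- ===== Notes on version B (the rewrite author's own statement) =====
-- stated objective: alternative
-- what changed: Replaces A's stateful string accumulator with manual flushes by a two-pointer run-splitting scan over the word list (skip boundary words, cut off each maximal non-boundary run) followed by joining each run with single spaces.
import Mathlib
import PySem

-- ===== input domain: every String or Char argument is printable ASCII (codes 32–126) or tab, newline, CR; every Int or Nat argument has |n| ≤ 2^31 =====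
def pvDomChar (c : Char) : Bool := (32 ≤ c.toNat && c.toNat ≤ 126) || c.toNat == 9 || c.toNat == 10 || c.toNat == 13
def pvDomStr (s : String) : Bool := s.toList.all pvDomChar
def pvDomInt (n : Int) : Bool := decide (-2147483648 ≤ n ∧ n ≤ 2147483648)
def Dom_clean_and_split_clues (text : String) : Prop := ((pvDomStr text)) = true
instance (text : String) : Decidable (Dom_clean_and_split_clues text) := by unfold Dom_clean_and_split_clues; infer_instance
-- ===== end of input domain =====

-- B replaces A's stateful string accumulator + manual flush with a run-splitting scan over
-- the word list followed by " ".join of each run (alternative decomposition, same cost).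


-- ===== PORT A =====
-- word.isdigit() and len(word) not in [3, 4]
def pvBoundary (w : String) : Bool :=
  PySem.Str.strIsdigit w && !(PySem.Str.len w == 3 || PySem.Str.len w == 4)

-- the fold step of A's loop; state = (cleared_clues, current_clue as chars)
def pvStepA (st : List String × List Char) (w : String) : List String × List Char :=
  if pvBoundary w then
    if st.2.isEmpty then st
    else (st.1 ++ [String.ofList (PySem.Chars.strip st.2)], [])
  else (st.1, st.2 ++ w.toList ++ [' '])

def clean_and_split_clues (text : String) : List String :=
  let t :=
    PySem.Str.replace (PySem.Str.replace (PySem.Str.replace (PySem.Str.replace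
      (PySem.Str.replace (PySem.Str.replace text "ORIZZONTALI" "") "VERTICALI" "")
        ":" "") "-" "") "_" "") "." ""
  let words := PySem.Str.split₀ t
  let st := words.foldl pvStepA ([], [])
  if st.2.isEmpty then st.1
  else st.1 ++ [String.ofList (PySem.Chars.strip st.2)]

-- ===== PORT B =====
-- B's outer while loop: skip a boundary word, else the inner while loop (j advancing over
-- non-boundary words = takeWhile/dropWhile) cuts off one run.
def pvRuns (ws : List String) : List (List String) :=
  match ws with
  | [] => []
  | w :: rest =>
    if pvBoundary w then pvRuns rest
    else (w :: rest.takeWhile (fun x => !pvBoundary x)) :: pvRuns (rest.dropWhile (fun x => !pvBoundary x))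
termination_by ws.length
decreasing_by
  all_goals simp
  all_goals (have := List.length_dropWhile_le (p := fun x => !pvBoundary x) (l := rest); omega)

def clean_and_split_clues_alt (text : String) : List String :=
  let t := List.foldl (fun s tok => PySem.Str.replace s tok "")
    text ["ORIZZONTALI", "VERTICALI", ":", "-", "_", "."]
  (pvRuns (PySem.Str.split₀ t)).map (fun r => PySem.Str.join " " r)

-- ===== PRECONDITION & SPEC =====
def Spec_clean_and_split_clues (text : String) (out : List String) : Prop := out = clean_and_split_clues_alt text
instance (text : String) (out : List String) : Decidable (Spec_clean_and_split_clues text out) := by unfold Spec_clean_and_split_clues; infer_instance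

-- ===== CLAIM (what is proved, stated in full; the proofs are below) =====
def Claim_equal_clean_and_split_clues : Prop := ∀ (text : String), Dom_clean_and_split_clues text → Spec_clean_and_split_clues text (clean_and_split_clues text)

-- ===== LEMMAS AND PROOFS =====

-- a "good" word: nonempty, no whitespace characters (what split() yields)
def pvGood (w : String) : Prop :=
  w.toList ≠ [] ∧ ∀ c ∈ w.toList, PySem.Chars.isspace c = false

-- chars of an open current_clue holding the run `run`
def pvFlat (run : List String) : List Char :=
  run.flatMap (fun w => w.toList ++ [' '])

lemma pvFlat_cons (w : String) (run : List String) :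
    pvFlat (w :: run) = w.toList ++ [' '] ++ pvFlat run := by
  simp [pvFlat]

lemma pvFlat_append (r s : List String) : pvFlat (r ++ s) = pvFlat r ++ pvFlat s := by
  simp [pvFlat]

lemma split₀_go_good (cs cur : List Char) (acc : List (List Char))
    (hcur : ∀ c ∈ cur, PySem.Chars.isspace c = false)
    (hacc : ∀ w ∈ acc, w ≠ [] ∧ ∀ c ∈ w, PySem.Chars.isspace c = false) :
    ∀ w ∈ PySem.Chars.split₀.go cs cur acc, w ≠ [] ∧ ∀ c ∈ w, PySem.Chars.isspace c = false := by
  induction cs generalizing cur acc with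
  | nil =>
    intro w hw
    by_cases h : cur.isEmpty
    · simp [PySem.Chars.split₀.go, h] at hw
      exact hacc w hw
    · simp [PySem.Chars.split₀.go, h] at hw
      rcases hw with hw | hw
      · exact hacc w hw
      · subst hw
        constructor
        · simp [List.isEmpty_iff] at h ⊢; exact h
        · intro c hc; exact hcur c (by simpa using hc)
  | cons c rest ih =>
    intro w hw
    by_cases hsp : PySem.Chars.isspace c
    · by_cases h : cur.isEmpty
      · simp [PySem.Chars.split₀.go, hsp, h] at hw
        exact ih [] acc (by simp) hacc w hw
      · simp [PySem.Chars.split₀.go, hsp, h] at hw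
        refine ih [] (cur.reverse :: acc) (by simp) ?_ w hw
        intro v hv
        rw [List.mem_cons] at hv
        rcases hv with hv | hv
        · subst hv
          constructor
          · simp [List.isEmpty_iff] at h ⊢; exact h
          · intro d hd; exact hcur d (by simpa using hd)
        · exact hacc v hv
    · simp [PySem.Chars.split₀.go, hsp] at hw
      refine ih (c :: cur) acc ?_ hacc w hw
      intro d hd
      rw [List.mem_cons] at hd
      rcases hd with hd | hd
      · subst hd; simpa using hsp
      · exact hcur d hd

lemma split₀_good (s : String) : ∀ w ∈ PySem.Str.split₀ s, pvGood w := by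
  intro w hw
  simp [PySem.Str.split₀] at hw
  obtain ⟨cs, hcs, rfl⟩ := hw
  have h := split₀_go_good s.toList [] [] (by simp) (by simp) cs hcs
  exact ⟨by simpa using h.1, by intro c hc; exact h.2 c (by simpa using hc)⟩

-- pvFlat run with the last word's trailing space removed is " ".join of the run
lemma inter_snoc (run : List String) (w : String) :
    List.intercalate [' '] ((run ++ [w]).map String.toList) = pvFlat run ++ w.toList := by
  induction run with
  | nil => simp [List.intercalate, pvFlat]
  | cons v rest ih =>
    have hne : (rest ++ [w]).map String.toList ≠ [] := by simp
    simp only [List.cons_append, List.map_cons]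
    cases h : (rest ++ [w]).map String.toList with
    | nil => exact absurd h hne
    | cons y ys =>
      calc List.intercalate [' '] (v.toList :: y :: ys)
          = v.toList ++ [' '] ++ List.intercalate [' '] (y :: ys) := by
            simp [List.intercalate]
        _ = v.toList ++ [' '] ++ (pvFlat rest ++ w.toList) := by rw [← h, ih]
        _ = pvFlat (v :: rest) ++ w.toList := by simp [pvFlat_cons]

lemma lstrip_flat (h : String) (t : List String) (hh : pvGood h) :
    PySem.Chars.lstrip (pvFlat (h :: t)) = pvFlat (h :: t) := by
  rcases hh with ⟨hne, hns⟩
  cases hc : h.toList with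
  | nil => exact absurd hc hne
  | cons c cs =>
    have : PySem.Chars.isspace c = false := hns c (by rw [hc]; simp)
    simp [PySem.Chars.lstrip, pvFlat_cons, hc, this]

lemma rstrip_flat_snoc (run : List String) (w : String) (hw : pvGood w) :
    PySem.Chars.rstrip (pvFlat (run ++ [w])) = pvFlat run ++ w.toList := by
  rcases hw with ⟨hne, hns⟩
  rcases List.eq_nil_or_concat' w.toList with hc | ⟨cs, c, hc⟩
  · exact absurd hc hne
  · have hcs : PySem.Chars.isspace c = false := hns c (by rw [hc]; simp)
    have : pvFlat (run ++ [w]) = pvFlat run ++ (cs ++ [c]) ++ [' '] := by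
      rw [pvFlat_append, ← hc]; simp [pvFlat]
    rw [this, hc]
    simp only [PySem.Chars.rstrip, List.reverse_append, List.reverse_cons, List.reverse_nil,
      List.nil_append, List.cons_append, List.dropWhile_cons]
    simp [show PySem.Chars.isspace ' ' = true from by decide, hcs]

lemma strip_flat (run : List String) (hrun : run ≠ []) (hg : ∀ w ∈ run, pvGood w) :
    PySem.Chars.strip (pvFlat run) = List.intercalate [' '] (run.map String.toList) := by
  induction run using List.reverseRecOn with
  | nil => exact absurd rfl hrun
  | append_singleton init w _ =>
    have hw : pvGood w := hg w (by simp)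
    rw [PySem.Chars.strip, inter_snoc]
    cases init with
    | nil =>
      have h1 := lstrip_flat w [] hw
      simpa [h1] using rstrip_flat_snoc [] w hw
    | cons v rest =>
      have hv : pvGood v := hg v (by simp)
      have h1 : PySem.Chars.lstrip (pvFlat ((v :: rest) ++ [w])) = pvFlat ((v :: rest) ++ [w]) := by
        have := lstrip_flat v (rest ++ [w]) hv
        simpa using this
      rw [h1, rstrip_flat_snoc _ w hw]

lemma flat_ne_nil (run : List String) (hrun : run ≠ []) : pvFlat run ≠ [] := by
  cases run with
  | nil => exact absurd rfl hrun
  | cons w rest => simp [pvFlat_cons]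

-- A's finish step applied to a fold state
def pvFinish (st : List String × List Char) : List String :=
  if st.2.isEmpty then st.1 else st.1 ++ [String.ofList (PySem.Chars.strip st.2)]

def pvJoin (r : List String) : String := PySem.Str.join " " r

lemma join_eq (r : List String) :
    pvJoin r = String.ofList (List.intercalate [' '] (r.map String.toList)) := by
  simp [pvJoin, PySem.Str.join, PySem.Chars.join]

-- the combined loop invariant, by strong induction on ws
lemma loop_both (n : Nat) : ∀ ws : List String, ws.length ≤ n →
    (∀ w ∈ ws, pvGood w) →
    (∀ acc, pvFinish (ws.foldl pvStepA (acc, [])) = acc ++ (pvRuns ws).map pvJoin) ∧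
    (∀ acc run, run ≠ [] → (∀ w ∈ run, pvGood w) →
      pvFinish (ws.foldl pvStepA (acc, pvFlat run)) =
        acc ++ pvJoin (run ++ ws.takeWhile (fun x => !pvBoundary x))
            :: (pvRuns (ws.dropWhile (fun x => !pvBoundary x))).map pvJoin) := by
  induction n with
  | zero =>
    intro ws hlen hg
    have : ws = [] := List.eq_nil_of_length_eq_zero (Nat.le_zero.mp hlen)
    subst this
    constructor
    · intro acc
      simp [pvFinish, pvRuns]
    · intro acc run hr hgr
      have hfl := flat_ne_nil run hr
      simp only [List.foldl_nil, List.takeWhile_nil, List.dropWhile_nil, pvRuns, List.map_nil,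
        List.append_nil]
      rw [pvFinish, if_neg (by simpa [List.isEmpty_iff] using hfl)]
      rw [strip_flat run hr hgr, ← join_eq]
  | succ n ih =>
    intro ws hlen hg
    cases ws with
    | nil =>
      constructor
      · intro acc
        simp [pvFinish, pvRuns]
      · intro acc run hr hgr
        have hfl := flat_ne_nil run hr
        simp only [List.foldl_nil, List.takeWhile_nil, List.dropWhile_nil, pvRuns, List.map_nil,
          List.append_nil]
        rw [pvFinish, if_neg (by simpa [List.isEmpty_iff] using hfl)]
        rw [strip_flat run hr hgr, ← join_eq]
    | cons w ws' =>
      have hlen' : ws'.length ≤ n := by simpa using hlen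
      have hg' : ∀ v ∈ ws', pvGood v := fun v hv => hg v (List.mem_cons_of_mem _ hv)
      have hgw : pvGood w := hg w (List.mem_cons_self ..)
      constructor
      · intro acc
        by_cases hb : pvBoundary w
        · rw [List.foldl_cons]
          have hstep : pvStepA (acc, []) w = (acc, []) := by simp [pvStepA, hb]
          rw [hstep, (ih ws' hlen' hg').1 acc]
          rw [pvRuns, if_pos hb]
        · rw [List.foldl_cons]
          have hstep : pvStepA (acc, []) w = (acc, pvFlat [w]) := by
            simp [pvStepA, hb, pvFlat]
          rw [hstep, (ih ws' hlen' hg').2 acc [w] (by simp) (by simpa using hgw)]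
          rw [pvRuns, if_neg hb]
          simp
      · intro acc run hr hgr
        by_cases hb : pvBoundary w
        · rw [List.foldl_cons]
          have hfl := flat_ne_nil run hr
          have hstep : pvStepA (acc, pvFlat run) w =
              (acc ++ [String.ofList (PySem.Chars.strip (pvFlat run))], []) := by
            simp only [pvStepA, if_pos hb]
            rw [if_neg (by simpa [List.isEmpty_iff] using hfl)]
          rw [hstep, (ih ws' hlen' hg').1 _]
          rw [List.takeWhile_cons, List.dropWhile_cons]
          simp only [hb, Bool.not_true, Bool.false_eq_true, if_false]
          rw [pvRuns, if_pos hb]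
          rw [strip_flat run hr hgr, ← join_eq]
          simp
        · rw [List.foldl_cons]
          have hstep : pvStepA (acc, pvFlat run) w = (acc, pvFlat (run ++ [w])) := by
            simp [pvStepA, hb, pvFlat]
          rw [hstep, (ih ws' hlen' hg').2 acc (run ++ [w]) (by simp)
            (by intro v hv; rcases List.mem_append.mp hv with h | h
                · exact hgr v h
                · simp at h; subst h; exact hgw)]
          rw [List.takeWhile_cons, List.dropWhile_cons]
          simp only [hb, Bool.not_false, if_true]
          simp

theorem clean_split_main (words : List String) (hg : ∀ w ∈ words, pvGood w) :
    pvFinish (words.foldl pvStepA ([], [])) = (pvRuns words).map pvJoin := by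
  have := (loop_both words.length words le_rfl hg).1 []
  simpa using this

-- ===== VERDICT (by name: the statement is the Claim_ definition above) =====
theorem clean_and_split_clues_spec : Claim_equal_clean_and_split_clues := by
  intro text _
  unfold Spec_clean_and_split_clues clean_and_split_clues clean_and_split_clues_alt
  simp only [List.foldl]
  exact clean_split_main _ (split₀_good _)
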